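-- pv_equiv track=rewrite | github.com/jahn18/Microservice-Trade-off-Analysis-Tool | back-end/getDecomposition.py | create_node_dict
-- ===== SOURCE A (Python) =====
-- def create_node_dict(dependency_graph):
--     node_dict = {}
--     i = 0
--     for dep in dependency_graph:
--         class_name_a = dep[0]
--         class_name_b = dep[1]
--         if class_name_a not in node_dict:
--             node_dict[class_name_a] = i
--             i += 1
--         if class_name_b not in node_dict:
--             node_dict[class_name_b] = i
--             i += 1
--
--     return node_dict
-- ===== SOURCE B (Python) =====
-- def create_node_dict(dependency_graph):
--     # Rank-by-sort: record each name's first-occurrence position by overwriting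
--     # backwards, then sort the distinct names by that position and enumerate.
--     flat = []
--     for dep in dependency_graph:
--         flat.append(dep[0])
--         flat.append(dep[1])
--     first = {}
--     for pos, name in reversed(list(enumerate(flat))):
--         first[name] = pos
--     names = sorted(first, key=first.get)
--     return {name: i for i, name in enumerate(names)}
-- ===== Notes on version B (the rewrite author's own statement) =====
-- stated objective: alternative
-- what changed: Replaces A's single interleaved pass with a manual counter and two membership branches by a rank-by-sort algorithm: flatten the names, compute each name's first-occurrence position by overwriting a dict backwards, sort the distinct names by that position, and enumerate; trades the incremental counter for a sort.
import Mathlib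
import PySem

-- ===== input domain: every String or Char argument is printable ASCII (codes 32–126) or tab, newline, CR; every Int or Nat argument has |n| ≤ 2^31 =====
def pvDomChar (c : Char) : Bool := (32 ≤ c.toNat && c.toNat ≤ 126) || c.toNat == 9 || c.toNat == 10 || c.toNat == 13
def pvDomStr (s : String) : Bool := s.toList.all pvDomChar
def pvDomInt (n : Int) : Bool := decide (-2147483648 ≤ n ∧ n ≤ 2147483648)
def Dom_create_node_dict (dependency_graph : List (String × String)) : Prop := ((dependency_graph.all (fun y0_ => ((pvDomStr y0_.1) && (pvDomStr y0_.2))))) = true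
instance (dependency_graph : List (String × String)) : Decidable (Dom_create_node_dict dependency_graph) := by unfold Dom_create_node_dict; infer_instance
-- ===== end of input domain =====

-- B replaces A's interleaved counter-and-two-branches loop by a rank-by-sort algorithm
-- (first-occurrence positions via a backwards overwrite pass, then sort + enumerate); same return value.

-- ===== PORT A =====
-- literal port of A: one loop, a dict and a counter, two membership-guarded inserts per dep
def create_node_dict (dependency_graph : List (String × String)) : List (String × Int) :=
  (dependency_graph.foldl
    (fun (s : PySem.Dict String Int × Int) dep =>
      let s := if s.1.contains dep.1 then s else (s.1.insert dep.1 s.2, s.2 + 1)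
      if s.1.contains dep.2 then s else (s.1.insert dep.2 s.2, s.2 + 1))
    (PySem.Dict.empty, 0)).1.items

-- ===== PORT B =====
-- literal port of Source B: flatten the names; build `first` by inserting pos→name pairs in
-- REVERSED enumeration order (so the first occurrence overwrites last); sort the dict's keys
-- by first.get (every key sorted ranges over is present in `first`, so first.get = getD _ 0); enumerate.
def create_node_dict_alt (dependency_graph : List (String × String)) : List (String × Int) :=
  let flat := dependency_graph.foldl (fun acc dep => acc ++ [dep.1, dep.2]) []
  let first := (PySem.List.enumerate flat).reverse.foldl
      (fun (d : PySem.Dict String Int) p => d.insert p.2 p.1) PySem.Dict.empty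
  let names := PySem.List.sorted first.keys (fun n => first.getD n 0) false
  (PySem.List.enumerate names).map (fun p => (p.2, p.1))

-- ===== PRECONDITION & SPEC =====
def Spec_create_node_dict (dependency_graph : List (String × String)) (out : List (String × Int)) : Prop := out = create_node_dict_alt dependency_graph
instance (dependency_graph : List (String × String)) (out : List (String × Int)) : Decidable (Spec_create_node_dict dependency_graph out) := by unfold Spec_create_node_dict; infer_instance

-- ===== CLAIM (what is proved, stated in full; the proofs are below) =====
def Claim_equal_create_node_dict : Prop := ∀ (dependency_graph : List (String × String)), Dom_create_node_dict dependency_graph → Spec_create_node_dict dependency_graph (create_node_dict dependency_graph)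

-- ===== LEMMAS AND PROOFS =====

/-- one membership-guarded insert: A's per-name step -/
def pvStep1 (s : PySem.Dict String Int × Int) (x : String) : PySem.Dict String Int × Int :=
  if s.1.contains x then s else (s.1.insert x s.2, s.2 + 1)

/-- the dict {name : index} over a list of distinct names, as A's loop builds it -/
def pvDictOf (L : List String) : PySem.Dict String Int :=
  ⟨(PySem.List.enumerate L).map (fun p => (p.2, p.1))⟩

theorem pvEnumerate_append_singleton {α : Type} (L : List α) (x : α) (s : Int) :
    PySem.List.enumerate (L ++ [x]) s = PySem.List.enumerate L s ++ [(s + L.length, x)] := by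
  induction L generalizing s with
  | nil => simp [PySem.List.enumerate]
  | cons a t ih =>
      simp [PySem.List.enumerate_cons, ih]
      ring_nf

theorem pvDictOf_contains (L : List String) (x : String) :
    (pvDictOf L).contains x = decide (x ∈ L) := by
  have h : ∀ (s : Int), (((PySem.List.enumerate L s).map (fun p : Int × String => (p.2, p.1))).any
      (fun p => p.1 == x)) = decide (x ∈ L) := by
    induction L with
    | nil => intro s; simp [PySem.List.enumerate]
    | cons a t ih =>
        intro s
        simp only [PySem.List.enumerate_cons, List.map_cons, List.any_cons, ih (s + 1)]
        by_cases hax : a = x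
        · simp [hax]
        · simp [beq_eq_false_iff_ne.mpr hax, Ne.symm hax]
  simpa [pvDictOf, PySem.Dict.contains] using h 0

theorem pvStep1_dictOf (L : List String) (x : String) :
    pvStep1 (pvDictOf L, (L.length : Int)) x
      = (pvDictOf (PySem.Set.add L x), ((PySem.Set.add L x).length : Int)) := by
  unfold pvStep1
  by_cases hx : x ∈ L
  · rw [PySem.Set.add_of_mem hx]
    simp [pvDictOf_contains, hx]
  · have hc : (pvDictOf L).contains x = false := by
      rw [pvDictOf_contains]; simp [hx]
    simp only [hc, Bool.false_eq_true, if_false, PySem.Set.add_of_not_mem hx]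
    rw [PySem.Dict.insert]
    simp only [hc, Bool.false_eq_true, if_false]
    simp [pvDictOf, pvEnumerate_append_singleton]

theorem pvFoldl_step1 (xs : List String) (L : List String) :
    xs.foldl pvStep1 (pvDictOf L, (L.length : Int))
      = (pvDictOf (PySem.Set.update L xs), ((PySem.Set.update L xs).length : Int)) := by
  induction xs generalizing L with
  | nil => simp [PySem.Set.update]
  | cons x t ih =>
      rw [List.foldl_cons, pvStep1_dictOf, ih, PySem.Set.update_cons]

/-- A's two-if loop body is two pvStep1 steps on the flattened name list -/
theorem pvA_eq_flat (g : List (String × String)) (s : PySem.Dict String Int × Int) :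
    g.foldl
      (fun (s : PySem.Dict String Int × Int) dep =>
        let s := if s.1.contains dep.1 then s else (s.1.insert dep.1 s.2, s.2 + 1)
        if s.1.contains dep.2 then s else (s.1.insert dep.2 s.2, s.2 + 1)) s
      = (g.flatMap (fun dep => [dep.1, dep.2])).foldl pvStep1 s := by
  induction g generalizing s with
  | nil => rfl
  | cons d t ih => simp [List.foldl_cons, ih, pvStep1]

theorem pvOrder_eq (g : List (String × String)) (acc : List String) :
    g.foldl (fun acc dep => acc ++ [dep.1, dep.2]) acc
      = acc ++ g.flatMap (fun dep => [dep.1, dep.2]) := by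
  induction g generalizing acc with
  | nil => simp
  | cons d t ih => simp [List.foldl_cons, ih]

/-- the backwards-overwrite loop: each name's value is its FIRST occurrence position -/
theorem pvFold_get (flat : List String) (s : Int) (d : PySem.Dict String Int) (x : String) :
    ((PySem.List.enumerate flat s).reverse.foldl
        (fun (d : PySem.Dict String Int) p => d.insert p.2 p.1) d).get? x
      = if x ∈ flat then some (s + (flat.idxOf x : Int)) else d.get? x := by
  induction flat generalizing s d with
  | nil => simp [PySem.List.enumerate]
  | cons a t ih =>
      rw [PySem.List.enumerate_cons, List.reverse_cons, List.foldl_append, List.foldl_cons,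
        List.foldl_nil]
      simp only [PySem.Dict.get?_insert]
      by_cases hxa : x = a
      · subst hxa; simp [List.idxOf_cons_self]
      · rw [if_neg hxa, ih]
        by_cases hxt : x ∈ t
        · have hidx : (a :: t).idxOf x = t.idxOf x + 1 := List.idxOf_cons_ne t (Ne.symm hxa)
          simp [hxt, hxa, hidx]
          ring
        · simp [hxt, hxa]

/-- the keys of the backwards-overwrite dict: the distinct names of flat.reverse -/
theorem pvFold_keys (flat : List String) (s : Int) :
    ((PySem.List.enumerate flat s).reverse.foldl
        (fun (d : PySem.Dict String Int) p => d.insert p.2 p.1) PySem.Dict.empty).keys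
      = PySem.Set.ofList flat.reverse := by
  have h := PySem.Dict.keys_foldl_insert_key
      (l := (PySem.List.enumerate flat s).reverse) (key := fun p : Int × String => p.2)
      (f := fun (d : PySem.Dict String Int) p => p.1) (d := PySem.Dict.empty)
  rw [h]
  have hm : ((PySem.List.enumerate flat s).reverse.map (fun p : Int × String => p.2))
      = flat.reverse := by
    rw [List.map_reverse, PySem.List.map_snd_enumerate]
  rw [hm]
  rfl

/-- Set.update appends exactly the not-yet-seen distinct elements -/
theorem pvUpdate_append_filter (ys : List String) : ∀ (s : List String),
    PySem.Set.update s ys = s ++ (PySem.List.dedup ys).filter (fun y => !s.contains y) := by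
  induction ys with
  | nil => intro s; simp [PySem.Set.update, PySem.List.dedup]
  | cons y t ih =>
      intro s
      rw [PySem.Set.update_cons, ih]
      have hd : PySem.List.dedup (y :: t)
          = y :: (PySem.List.dedup t).filter (fun z => !([y] : List String).contains z) := by
        have h1 : PySem.List.dedup (y :: t) = PySem.Set.update [] (y :: t) := rfl
        rw [h1, PySem.Set.update_cons]
        have h2 : PySem.Set.add ([] : List String) y = [y] := rfl
        rw [h2, ih]
        rfl
      rw [hd]
      by_cases hy : y ∈ s
      · have hc : s.contains y = true := by simpa using hy
        rw [PySem.Set.add_of_mem hy]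
        simp only [List.filter_cons, hc, Bool.not_true, Bool.false_eq_true, if_false,
          List.filter_filter]
        congr 1
        apply List.filter_congr
        intro z hz
        by_cases hzs : z ∈ s
        · simp [hzs]
        · have hzy : z ≠ y := fun h => hzs (h ▸ hy)
          simp [hzs, hzy]
      · have hc : s.contains y = false := by simpa using hy
        rw [PySem.Set.add_of_not_mem hy]
        simp only [List.filter_cons, hc, Bool.not_false, if_true, List.filter_filter,
          List.append_assoc, List.singleton_append]
        congr 2
        apply List.filter_congr
        intro z hz
        by_cases hzy : z = y
        · simp [hzy]
        · by_cases hzs : z ∈ s <;> simp [hzy, hzs]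

/-- dedup keeps the head, then the distinct elements of the tail other than the head -/
theorem pvDedup_cons (x : String) (t : List String) :
    PySem.List.dedup (x :: t)
      = x :: (PySem.List.dedup t).filter (fun z => !([x] : List String).contains z) := by
  have h1 : PySem.List.dedup (x :: t) = PySem.Set.update [] (x :: t) := rfl
  rw [h1, PySem.Set.update_cons]
  have h2 : PySem.Set.add ([] : List String) x = [x] := rfl
  rw [h2, pvUpdate_append_filter]
  rfl

/-- dedup lists the distinct names in strictly increasing first-occurrence order -/
theorem pvDedup_idxOf_pairwise (xs : List String) :
    (PySem.List.dedup xs).Pairwise (fun a b => xs.idxOf a < xs.idxOf b) := by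
  induction xs with
  | nil => simp [PySem.List.dedup]
  | cons x t ih =>
      rw [pvDedup_cons]
      constructor
      · intro b hb
        have hbx : b ≠ x := by
          have := List.of_mem_filter hb
          simpa using this
        rw [List.idxOf_cons_self, List.idxOf_cons_ne t (Ne.symm hbx)]
        omega
      · have hp : ((PySem.List.dedup t).filter
            (fun z => !([x] : List String).contains z)).Pairwise
            (fun a b => t.idxOf a < t.idxOf b) := ih.sublist List.filter_sublist
        refine hp.imp_of_mem ?_
        intro a b ha hb hab
        have hax : a ≠ x := by have := List.of_mem_filter ha; simpa using this
        have hbx : b ≠ x := by have := List.of_mem_filter hb; simpa using this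
        rw [List.idxOf_cons_ne t (Ne.symm hax), List.idxOf_cons_ne t (Ne.symm hbx)]
        omega

/-- B's sort by first-occurrence position recovers exactly the first-appearance order -/
theorem pvNames_eq_dedup (flat : List String)
    (first : PySem.Dict String Int)
    (hf : first = (PySem.List.enumerate flat).reverse.foldl
        (fun (d : PySem.Dict String Int) p => d.insert p.2 p.1) PySem.Dict.empty) :
    PySem.List.sorted first.keys (fun n => first.getD n 0) false = PySem.List.dedup flat := by
  have hget : ∀ x ∈ flat, first.getD x 0 = (flat.idxOf x : Int) := by
    intro x hx
    have h := pvFold_get flat 0 PySem.Dict.empty x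
    rw [if_pos hx] at h
    rw [hf, PySem.Dict.getD_eq_get?_getD, h]
    simp
  apply PySem.List.sorted_eq_of_perm_of_pairwise_lt
  · rw [hf, pvFold_keys]
    rw [List.perm_ext_iff_of_nodup (PySem.List.nodup_dedup flat) (PySem.Set.nodup_ofList _)]
    intro a
    rw [PySem.List.mem_dedup, PySem.Set.mem_ofList, List.mem_reverse]
  · refine (pvDedup_idxOf_pairwise flat).imp_of_mem ?_
    intro a b ha hb hab
    rw [hget a ((PySem.List.mem_dedup _ _).mp ha), hget b ((PySem.List.mem_dedup _ _).mp hb)]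
    exact_mod_cast hab

-- ===== VERDICT (by name: the statement is the Claim_ definition above) =====
theorem create_node_dict_spec : Claim_equal_create_node_dict := by
  intro g _
  show create_node_dict g = create_node_dict_alt g
  unfold create_node_dict create_node_dict_alt
  simp only [pvOrder_eq, List.nil_append]
  rw [pvA_eq_flat, pvNames_eq_dedup _ _ rfl]
  have h0 : (PySem.Dict.empty : PySem.Dict String Int) = pvDictOf [] := rfl
  rw [h0]
  have h1 : ((0 : Int)) = (([] : List String).length : Int) := by simp
  rw [h1, pvFoldl_step1]
  simp [pvDictOf, PySem.List.dedup_eq_ofList, PySem.Set.ofList_eq_foldl, PySem.Set.update]
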